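-- pv_equiv track=rewrite | github.com/ulanpy/nuspace | backend/modules/auth/utils.py | _select_mock_user
-- ===== SOURCE A (Python) =====
-- MOCK_USERS: list[dict] = [
--     {
--         "email": "alice@example.com",
--         "given_name": "Alice",
--         "family_name": "Anderson",
--         "picture": "https://i.pravatar.cc/150?img=3",
--         "sub": "mock-sub-alice",
--     },
--     {
--         "email": "bob@example.com",
--         "given_name": "Bob",
--         "family_name": "Brown",
--         "picture": "https://i.pravatar.cc/150?img=4",
--         "sub": "mock-sub-bob",
--     },
--     {
--         "email": "charlie@example.com",
--         "given_name": "Charlie",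
--         "family_name": "Clark",
--         "picture": "https://i.pravatar.cc/150?img=5",
--         "sub": "mock-sub-charlie",
--     },
-- ]
--
-- def _select_mock_user(selector: str | None) -> dict:
--     """Pick a mock user by index ("1".."3"), email, name, or sub. Defaults to first."""
--     if not selector:
--         return MOCK_USERS[0]
--     s = selector.strip().lower()
--     # by index
--     if s in {"1", "2", "3"}:
--         return MOCK_USERS[int(s) - 1]
--     # by email or sub or given_name
--     for u in MOCK_USERS:
--         if s in {
--             u["email"].lower(),
--             u["sub"].lower(),
--             u["given_name"].lower(),
--         }:
--             return u
--     return MOCK_USERS[0]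
-- ===== SOURCE B (Python) =====
-- MOCK_USERS: list[dict] = [
--     {
--         "email": "alice@example.com",
--         "given_name": "Alice",
--         "family_name": "Anderson",
--         "picture": "https://i.pravatar.cc/150?img=3",
--         "sub": "mock-sub-alice",
--     },
--     {
--         "email": "bob@example.com",
--         "given_name": "Bob",
--         "family_name": "Brown",
--         "picture": "https://i.pravatar.cc/150?img=4",
--         "sub": "mock-sub-bob",
--     },
--     {
--         "email": "charlie@example.com",
--         "given_name": "Charlie",
--         "family_name": "Clark",
--         "picture": "https://i.pravatar.cc/150?img=5",
--         "sub": "mock-sub-charlie",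
--     },
-- ]
--
-- # Lookup table built once: index strings "1".."3" and each user's lowercased
-- # email / sub / given_name all map to that user.
-- _INDEX: dict = {}
-- for _i, _u in enumerate(MOCK_USERS):
--     _INDEX[str(_i + 1)] = _u
--     _INDEX[_u["email"].lower()] = _u
--     _INDEX[_u["sub"].lower()] = _u
--     _INDEX[_u["given_name"].lower()] = _u
--
--
-- def _select_mock_user(selector):
--     if not selector:
--         return MOCK_USERS[0]
--     return _INDEX.get(selector.strip().lower(), MOCK_USERS[0])
-- ===== Notes on version B (the rewrite author's own statement) =====
-- stated objective: idiomatic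
-- what changed: Replaces A's index branch plus linear scan over MOCK_USERS (with a per-user set build) by a single module-level lookup table built once, mapping '1'..'3' and each user's lowercased email/sub/given_name to the user, so the function body is one dict .get with MOCK_USERS[0] as default.
import Mathlib
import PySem

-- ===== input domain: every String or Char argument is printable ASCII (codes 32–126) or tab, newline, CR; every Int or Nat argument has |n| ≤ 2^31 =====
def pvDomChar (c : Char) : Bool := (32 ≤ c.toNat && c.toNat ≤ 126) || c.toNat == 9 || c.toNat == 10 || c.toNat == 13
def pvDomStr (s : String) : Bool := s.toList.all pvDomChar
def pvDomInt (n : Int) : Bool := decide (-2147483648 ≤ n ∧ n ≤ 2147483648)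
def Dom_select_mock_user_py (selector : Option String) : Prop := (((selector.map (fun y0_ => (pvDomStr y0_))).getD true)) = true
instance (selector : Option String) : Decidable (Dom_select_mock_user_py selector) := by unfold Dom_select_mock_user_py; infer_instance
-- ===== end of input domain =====

-- B replaces A's index branch and linear scan with one prebuilt selector→user lookup table (idiomatic; return-value equivalence).


-- module-level constant MOCK_USERS (shared by both modules)
def mockUsers : List (List (String × String)) :=
  [ [("email", "alice@example.com"), ("given_name", "Alice"), ("family_name", "Anderson"),
     ("picture", "https://i.pravatar.cc/150?img=3"), ("sub", "mock-sub-alice")],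
    [("email", "bob@example.com"), ("given_name", "Bob"), ("family_name", "Brown"),
     ("picture", "https://i.pravatar.cc/150?img=4"), ("sub", "mock-sub-bob")],
    [("email", "charlie@example.com"), ("given_name", "Charlie"), ("family_name", "Clark"),
     ("picture", "https://i.pravatar.cc/150?img=5"), ("sub", "mock-sub-charlie")] ]

-- ===== PORT A =====
-- the 'for u in MOCK_USERS' loop of A (falls through to MOCK_USERS[0])
def aScan : List (List (String × String)) → String → List (String × String)
  | [], _ => mockUsers.headD []
  | u :: rest, s =>
    if [PySem.Str.lower ((PySem.Dict.mk u).getD "email" ""),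
        PySem.Str.lower ((PySem.Dict.mk u).getD "sub" ""),
        PySem.Str.lower ((PySem.Dict.mk u).getD "given_name" "")].contains s
    then u else aScan rest s

def select_mock_user_py (selector : Option String) : List (String × String) :=
  match selector with
  | none => mockUsers.headD []          -- 'if not selector'
  | some sel =>
    if sel = "" then mockUsers.headD [] -- '' is falsy too
    else
      let s := PySem.Str.lower (PySem.Str.strip sel)
      if ["1", "2", "3"].contains s then
        match PySem.Int.ofStr? s with   -- int(s); always succeeds here
        | some n => (PySem.List.pyGet? mockUsers (n - 1)).getD []
        | none => []
      else aScan mockUsers s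

-- ===== PORT B =====
-- the module-level _INDEX build loop of Source B
def bIndex : PySem.Dict String (List (String × String)) :=
  (PySem.List.enumerate mockUsers).foldl
    (fun d p =>
      let u := p.2
      ((((d.insert (PySem.Int.toStr (p.1 + 1)) u).insert
            (PySem.Str.lower ((PySem.Dict.mk u).getD "email" "")) u).insert
            (PySem.Str.lower ((PySem.Dict.mk u).getD "sub" "")) u).insert
            (PySem.Str.lower ((PySem.Dict.mk u).getD "given_name" "")) u))
    PySem.Dict.empty

def select_mock_user_py_alt (selector : Option String) : List (String × String) :=
  match selector with
  | none => mockUsers.headD []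
  | some sel =>
    if sel = "" then mockUsers.headD []
    else (bIndex.get? (PySem.Str.lower (PySem.Str.strip sel))).getD (mockUsers.headD [])

-- ===== PRECONDITION & SPEC =====
def Spec_select_mock_user_py (selector : Option String) (out : List (String × String)) : Prop := out = select_mock_user_py_alt selector
instance (selector : Option String) (out : List (String × String)) : Decidable (Spec_select_mock_user_py selector out) := by unfold Spec_select_mock_user_py; infer_instance

-- ===== CLAIM (what is proved, stated in full; the proofs are below) =====
def Claim_equal_select_mock_user_py : Prop := ∀ (selector : Option String), Dom_select_mock_user_py selector → Spec_select_mock_user_py selector (select_mock_user_py selector)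

-- ===== LEMMAS AND PROOFS =====

lemma bIndex_eq : bIndex = PySem.Dict.mk
    [("1", mockUsers[0]), ("alice@example.com", mockUsers[0]), ("mock-sub-alice", mockUsers[0]), ("alice", mockUsers[0]),
     ("2", mockUsers[1]), ("bob@example.com", mockUsers[1]), ("mock-sub-bob", mockUsers[1]), ("bob", mockUsers[1]),
     ("3", mockUsers[2]), ("charlie@example.com", mockUsers[2]), ("mock-sub-charlie", mockUsers[2]), ("charlie", mockUsers[2])] := by
  decide

lemma dispatch_eq (s : String) :
    (if ["1", "2", "3"].contains s then
        match PySem.Int.ofStr? s with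
        | some n => (PySem.List.pyGet? mockUsers (n - 1)).getD []
        | none => []
      else aScan mockUsers s)
      = (bIndex.get? s).getD (mockUsers.headD []) := by
  by_cases h1 : s = "1"; · subst h1; decide
  by_cases h2 : s = "2"; · subst h2; decide
  by_cases h3 : s = "3"; · subst h3; decide
  by_cases h4 : s = "alice@example.com"; · subst h4; decide
  by_cases h5 : s = "mock-sub-alice"; · subst h5; decide
  by_cases h6 : s = "alice"; · subst h6; decide
  by_cases h7 : s = "bob@example.com"; · subst h7; decide
  by_cases h8 : s = "mock-sub-bob"; · subst h8; decide
  by_cases h9 : s = "bob"; · subst h9; decide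
  by_cases h10 : s = "charlie@example.com"; · subst h10; decide
  by_cases h11 : s = "mock-sub-charlie"; · subst h11; decide
  by_cases h12 : s = "charlie"; · subst h12; decide
  rw [bIndex_eq]
  simp only [mockUsers, aScan]
  have k0e : PySem.Str.lower ((PySem.Dict.mk ([("email", "alice@example.com"), ("given_name", "Alice"), ("family_name", "Anderson"), ("picture", "https://i.pravatar.cc/150?img=3"), ("sub", "mock-sub-alice")] : List (String × String))).getD "email" "") = "alice@example.com" := by decide
  have k0s : PySem.Str.lower ((PySem.Dict.mk ([("email", "alice@example.com"), ("given_name", "Alice"), ("family_name", "Anderson"), ("picture", "https://i.pravatar.cc/150?img=3"), ("sub", "mock-sub-alice")] : List (String × String))).getD "sub" "") = "mock-sub-alice" := by decide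
  have k0g : PySem.Str.lower ((PySem.Dict.mk ([("email", "alice@example.com"), ("given_name", "Alice"), ("family_name", "Anderson"), ("picture", "https://i.pravatar.cc/150?img=3"), ("sub", "mock-sub-alice")] : List (String × String))).getD "given_name" "") = "alice" := by decide
  have k1e : PySem.Str.lower ((PySem.Dict.mk ([("email", "bob@example.com"), ("given_name", "Bob"), ("family_name", "Brown"), ("picture", "https://i.pravatar.cc/150?img=4"), ("sub", "mock-sub-bob")] : List (String × String))).getD "email" "") = "bob@example.com" := by decide
  have k1s : PySem.Str.lower ((PySem.Dict.mk ([("email", "bob@example.com"), ("given_name", "Bob"), ("family_name", "Brown"), ("picture", "https://i.pravatar.cc/150?img=4"), ("sub", "mock-sub-bob")] : List (String × String))).getD "sub" "") = "mock-sub-bob" := by decide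
  have k1g : PySem.Str.lower ((PySem.Dict.mk ([("email", "bob@example.com"), ("given_name", "Bob"), ("family_name", "Brown"), ("picture", "https://i.pravatar.cc/150?img=4"), ("sub", "mock-sub-bob")] : List (String × String))).getD "given_name" "") = "bob" := by decide
  have k2e : PySem.Str.lower ((PySem.Dict.mk ([("email", "charlie@example.com"), ("given_name", "Charlie"), ("family_name", "Clark"), ("picture", "https://i.pravatar.cc/150?img=5"), ("sub", "mock-sub-charlie")] : List (String × String))).getD "email" "") = "charlie@example.com" := by decide
  have k2s : PySem.Str.lower ((PySem.Dict.mk ([("email", "charlie@example.com"), ("given_name", "Charlie"), ("family_name", "Clark"), ("picture", "https://i.pravatar.cc/150?img=5"), ("sub", "mock-sub-charlie")] : List (String × String))).getD "sub" "") = "mock-sub-charlie" := by decide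
  have k2g : PySem.Str.lower ((PySem.Dict.mk ([("email", "charlie@example.com"), ("given_name", "Charlie"), ("family_name", "Clark"), ("picture", "https://i.pravatar.cc/150?img=5"), ("sub", "mock-sub-charlie")] : List (String × String))).getD "given_name" "") = "charlie" := by decide
  rw [k0e, k0s, k0g, k1e, k1s, k1g, k2e, k2s, k2g]
  simp [PySem.Dict.get?,
    Ne.symm h1, Ne.symm h2, Ne.symm h3, Ne.symm h4, Ne.symm h5, Ne.symm h6,
    Ne.symm h7, Ne.symm h8, Ne.symm h9, Ne.symm h10, Ne.symm h11, Ne.symm h12,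
    h1, h2, h3, h4, h5, h6, h7, h8, h9, h10, h11, h12]

-- ===== VERDICT (by name: the statement is the Claim_ definition above) =====
theorem select_mock_user_py_spec : Claim_equal_select_mock_user_py := by
  intro selector _
  unfold Spec_select_mock_user_py select_mock_user_py select_mock_user_py_alt
  cases selector with
  | none => rfl
  | some sel =>
    by_cases h : sel = ""
    · simp [h]
    · simp only [h, if_false]
      exact dispatch_eq (PySem.Str.lower (PySem.Str.strip sel))
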